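-- pv_equiv track=rewrite | github.com/xiaominghd/YueAo | neo2flask.py | node2index
-- ===== SOURCE A (Python) =====
-- def node2index(nodelist):
--
--     name2index={}
--     index=0
--
--     for node in nodelist:
--
--         if(node['name'] not in name2index):
--             name2index.update({node['name']:index})
--             index+=1
--
--     return name2index
-- ===== SOURCE B (Python) =====
-- def node2index(nodelist):
--     # selection-by-filtering: repeatedly take the first remaining name, give it
--     # the next index, and filter every occurrence of it out of the worklist
--     names = [node['name'] for node in nodelist]
--     result = {}
--     i = 0
--     while names:
--         head = names[0]
--         result[head] = i
--         i += 1
--         names = [x for x in names if x != head]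
--     return result
-- ===== Notes on version B (the rewrite author's own statement) =====
-- stated objective: alternative
-- what changed: Replaces A's single pass with a membership-tested dict by a selection-by-filtering loop: the first remaining name gets the next index and all its occurrences are filtered out of the worklist, so no membership test or dedup dict is needed.
import Mathlib
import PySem

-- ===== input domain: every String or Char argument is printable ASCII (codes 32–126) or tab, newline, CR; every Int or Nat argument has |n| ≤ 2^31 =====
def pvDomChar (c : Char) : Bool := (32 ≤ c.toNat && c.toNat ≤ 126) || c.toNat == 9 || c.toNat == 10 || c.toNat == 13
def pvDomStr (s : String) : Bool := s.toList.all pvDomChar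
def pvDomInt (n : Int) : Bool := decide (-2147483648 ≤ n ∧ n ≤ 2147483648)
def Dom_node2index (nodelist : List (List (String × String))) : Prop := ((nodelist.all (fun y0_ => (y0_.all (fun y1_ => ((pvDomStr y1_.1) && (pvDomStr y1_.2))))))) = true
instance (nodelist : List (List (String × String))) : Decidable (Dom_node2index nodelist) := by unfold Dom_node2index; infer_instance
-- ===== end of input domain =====

-- B replaces A's membership-tested single pass by a selection-by-filtering loop
-- (first remaining name gets the next index, its occurrences are filtered out);
-- objective: alternative (same results, different algorithm, no speed claim).

-- node['name'] (first match in the association list; "" never reached under Pre_)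
def pvName (node : List (String × String)) : String :=
  (PySem.Dict.mk node).getD "name" ""

-- ===== PORT A =====
def node2index (nodelist : List (List (String × String))) : List (String × Int) :=
  (nodelist.foldl
    (fun (st : PySem.Dict String Int × Int) node =>
      if st.1.contains (pvName node) then st
      else (st.1.insert (pvName node) st.2, st.2 + 1))
    (PySem.Dict.empty, 0)).1.items

-- ===== PORT B =====
-- the while loop of Source B: head of the worklist gets index i (head is not yet in
-- result — every earlier head's occurrences were filtered out — so the dict
-- assignment result[head] = i appends the pair), then the worklist is filtered
def n2iLoop : List String → Int → List (String × Int)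
  | [], _ => []
  | h :: t, i => (h, i) :: n2iLoop ((h :: t).filter (fun x => x != h)) (i + 1)
termination_by names _ => names.length
decreasing_by
  simp only [List.filter_cons, bne_self_eq_false]
  exact Nat.lt_succ_of_le (List.length_filter_le _ _)

def node2index_alt (nodelist : List (List (String × String))) : List (String × Int) :=
  n2iLoop (nodelist.map pvName) 0

-- ===== PRECONDITION & SPEC =====
-- Pre_ excludes only inputs where some node lacks the key "name": there Python A
-- (and B alike) raises KeyError.
def Pre_node2index (nodelist : List (List (String × String))) : Prop :=
  (nodelist.all (fun node => (PySem.Dict.mk node).contains "name")) = true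
instance (nodelist : List (List (String × String))) : Decidable (Pre_node2index nodelist) := by unfold Pre_node2index; infer_instance

def pvWitness_node2index : (List (List (String × String))) :=
  [[("name", "a")], [("name", "b")], [("name", "a")]]

def Spec_node2index (nodelist : List (List (String × String))) (out : List (String × Int)) : Prop := out = node2index_alt nodelist
instance (nodelist : List (List (String × String))) (out : List (String × Int)) : Decidable (Spec_node2index nodelist out) := by unfold Spec_node2index; infer_instance

-- ===== CLAIM (what is proved, stated in full; the proofs are below) =====
def Claim_equal_node2index : Prop := ∀ (nodelist : List (List (String × String))), Dom_node2index nodelist → Pre_node2index nodelist → Spec_node2index nodelist (node2index nodelist)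

-- ===== LEMMAS AND PROOFS =====

-- A's loop, fully characterised: the dict's items are the enumerated first-occurrence
-- distinct names (key first), the counter is their number.
theorem node2index_loop (nodelist : List (List (String × String))) :
    nodelist.foldl
      (fun (st : PySem.Dict String Int × Int) node =>
        if st.1.contains (pvName node) then st
        else (st.1.insert (pvName node) st.2, st.2 + 1))
      (PySem.Dict.empty, 0)
    = (PySem.Dict.mk ((PySem.List.enumerate (PySem.List.dedup (nodelist.map pvName)) 0).map
        (fun p => (p.2, p.1))),
       ((PySem.List.dedup (nodelist.map pvName)).length : Int)) := by
  induction nodelist using List.reverseRecOn with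
  | nil => rfl
  | append_singleton l nd ih =>
    have hcon : (PySem.Set.ofList (l.map pvName)).contains (pvName nd)
        = decide (pvName nd ∈ l.map pvName) := by
      have := PySem.Set.mem_ofList (l.map pvName) (pvName nd)
      simp only [PySem.Set.contains]
      simp [this]
    have hded : PySem.List.dedup (l.map pvName ++ [pvName nd]) =
        if pvName nd ∈ l.map pvName then PySem.List.dedup (l.map pvName)
        else PySem.List.dedup (l.map pvName) ++ [pvName nd] := by
      rw [PySem.List.dedup_eq_ofList, PySem.List.dedup_eq_ofList,
        PySem.Set.ofList_eq_foldl (l.map pvName ++ [pvName nd]), List.foldl_append,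
        ← PySem.Set.ofList_eq_foldl]
      simp only [List.foldl_cons, List.foldl_nil, PySem.Set.add, hcon]
      by_cases hx : pvName nd ∈ l.map pvName
      · rw [if_pos (by simp [hx]), if_pos hx]
      · rw [if_neg (by simp [hx]), if_neg hx]
    have hkeys : (PySem.Dict.mk
        ((PySem.List.enumerate (PySem.List.dedup (l.map pvName)) 0).map
          (fun p => (p.2, p.1)))).contains (pvName nd)
        = decide (pvName nd ∈ l.map pvName) := by
      rw [PySem.Dict.contains_eq_decide_mem_keys]
      simp [PySem.Dict.keys, List.map_map, Function.comp_def, PySem.List.map_snd_enumerate]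
    rw [List.map_append, List.map_cons, List.map_nil, List.foldl_append, ih]
    simp only [List.foldl_cons, List.foldl_nil, hkeys]
    by_cases hx : pvName nd ∈ l.map pvName
    · rw [if_pos (by simp [hx]), hded, if_pos hx]
    · have hc : (PySem.Dict.mk
          ((PySem.List.enumerate (PySem.List.dedup (l.map pvName)) 0).map
            (fun p => (p.2, p.1)))).contains (pvName nd) = false := by
        rw [hkeys]; simp [hx]
      rw [if_neg (by simp [hx]), hded, if_neg hx, Prod.mk.injEq]
      refine ⟨?_, ?_⟩
      · apply PySem.Dict.ext
        rw [PySem.Dict.items_insert_of_not_contains _ _ hc]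
        simp [PySem.List.enumerate_append, PySem.List.enumerate]
      · simp only [List.length_append, List.length_cons, List.length_nil]
        push_cast
        ring

-- Set.add absorbs an element already present, so folding over a list may skip
-- every occurrence of such an element
theorem foldl_add_filter (a : String) : ∀ (l : List String) (s : List String), a ∈ s →
    l.foldl PySem.Set.add s = (l.filter (fun x => x != a)).foldl PySem.Set.add s := by
  intro l
  induction l with
  | nil => intro s _; rfl
  | cons x t ih =>
    intro s hs
    by_cases hxa : x = a
    · subst hxa
      have habs : PySem.Set.add s x = s := by
        simp [PySem.Set.add, PySem.Set.contains, hs]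
      simp only [List.filter_cons, bne_self_eq_false, List.foldl_cons, habs]
      exact ih s hs
    · have : (x != a) = true := by simp [hxa]
      simp only [List.filter_cons, this, List.foldl_cons]
      exact ih (PySem.Set.add s x) (by simp [PySem.Set.add]; split <;> simp [hs])

-- an element absent from the list stays at the head of the accumulator
theorem foldl_add_cons (a : String) : ∀ (l : List String) (s : List String), a ∉ l →
    l.foldl PySem.Set.add (a :: s) = a :: l.foldl PySem.Set.add s := by
  intro l
  induction l with
  | nil => intro s _; rfl
  | cons x t ih =>
    intro s hmem
    have hxa : x ≠ a := fun h => hmem (by simp [h])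
    have hadd : PySem.Set.add (a :: s) x = a :: PySem.Set.add s x := by
      simp [PySem.Set.add, PySem.Set.contains, hxa]
      split <;> simp
    simp only [List.foldl_cons, hadd]
    exact ih (PySem.Set.add s x) (fun h => hmem (by simp [h]))

-- ordered dedup unfolds as selection-by-filtering
theorem dedup_cons_filter (h : String) (t : List String) :
    PySem.List.dedup (h :: t) = h :: PySem.List.dedup (t.filter (fun x => x != h)) := by
  rw [PySem.List.dedup_eq_ofList, PySem.List.dedup_eq_ofList,
    PySem.Set.ofList_eq_foldl, PySem.Set.ofList_eq_foldl]
  simp only [List.foldl_cons]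
  have h0 : PySem.Set.add [] h = [h] := by simp [PySem.Set.add, PySem.Set.contains]
  rw [h0, foldl_add_filter h t [h] (by simp)]
  have : h ∉ t.filter (fun x => x != h) := by simp
  exact foldl_add_cons h (t.filter (fun x => x != h)) [] this

-- B's loop computes the enumerated ordered-distinct names, key first
theorem n2iLoop_eq (names : List String) (i : Int) :
    n2iLoop names i
      = (PySem.List.enumerate (PySem.List.dedup names) i).map (fun p => (p.2, p.1)) := by
  induction names, i using n2iLoop.induct with
  | case1 i => simp [n2iLoop, PySem.List.dedup]
  | case2 h t i ih =>
    have hf : List.filter (fun x => x != h) (h :: t) = List.filter (fun x => x != h) t := by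
      simp
    rw [n2iLoop, dedup_cons_filter, PySem.List.enumerate_cons, List.map_cons]
    rw [hf] at ih
    rw [hf, ih]

theorem node2index_spec_aux (nodelist : List (List (String × String))) :
    node2index nodelist = node2index_alt nodelist := by
  unfold node2index node2index_alt
  rw [node2index_loop, n2iLoop_eq]

-- ===== VERDICT (by name: the statement is the Claim_ definition above) =====
theorem node2index_spec : Claim_equal_node2index := by
  intro nodelist _ _
  exact node2index_spec_aux nodelist
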